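-- pv_equiv track=rewrite | github.com/nakamotosai/japan-house-price-map | scripts/build_tokyo_station_master.py | slugify_station_id
-- ===== SOURCE A (Python) =====
-- def slugify_station_id(name_ja: str, fallback_code: str) -> str:
--     translated = []
--     previous_dash = False
--
--     for character in name_ja.lower():
--         if "a" <= character <= "z" or "0" <= character <= "9":
--             translated.append(character)
--             previous_dash = False
--             continue
--
--         if character in {" ", "-", "_"}:
--             if not previous_dash:
--                 translated.append("-")
--             previous_dash = True
--             continue
--
--     slug = "".join(translated).strip("-")
--     if slug:
--         return slug
--
--     return f"station-{fallback_code}"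
-- ===== SOURCE B (Python) =====
-- def slugify_station_id(name_ja: str, fallback_code: str) -> str:
--     # One filtering comprehension (invalid chars deleted, separators mapped to "-"),
--     # then split/join to collapse separator runs and trim the edges.
--     kept = "".join("-" if c in " -_" else c
--                    for c in name_ja.lower()
--                    if "a" <= c <= "z" or "0" <= c <= "9" or c in " -_")
--     slug = "-".join(p for p in kept.split("-") if p)
--     return slug or f"station-{fallback_code}"
-- ===== Notes on version B (the rewrite author's own statement) =====
-- stated objective: idiomatic
-- what changed: Replaces A's stateful character loop with a previous_dash flag by a filter-and-map pass followed by split('-')/join('-') to collapse separator runs and trim edges.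
import Mathlib
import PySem

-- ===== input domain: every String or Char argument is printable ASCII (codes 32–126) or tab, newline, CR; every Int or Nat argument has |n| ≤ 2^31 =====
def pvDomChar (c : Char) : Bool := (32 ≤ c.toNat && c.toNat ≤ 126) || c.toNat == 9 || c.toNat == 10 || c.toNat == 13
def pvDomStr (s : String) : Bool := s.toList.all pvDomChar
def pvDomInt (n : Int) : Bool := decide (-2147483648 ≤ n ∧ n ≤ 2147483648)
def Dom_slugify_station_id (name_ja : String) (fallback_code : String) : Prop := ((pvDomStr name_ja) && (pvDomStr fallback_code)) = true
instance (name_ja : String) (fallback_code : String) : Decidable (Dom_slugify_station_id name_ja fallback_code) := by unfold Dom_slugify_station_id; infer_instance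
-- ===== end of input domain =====

-- B rewrites A's stateful loop (previous_dash flag) as filter-map + split/join; same cost, more idiomatic.

-- ===== PORT A =====
def slugify_station_id (name_ja : String) (fallback_code : String) : String :=
  let r := (PySem.Str.lower name_ja).toList.foldl
    (fun (st : List Char × Bool) character =>
      if ('a' ≤ character ∧ character ≤ 'z') ∨ ('0' ≤ character ∧ character ≤ '9') then
        (st.1 ++ [character], false)
      else if character = ' ' ∨ character = '-' ∨ character = '_' then
        ((if st.2 then st.1 else st.1 ++ ['-']), true)
      else st)
    ([], false)
  let slug := String.mk (PySem.Chars.stripChars r.1 ['-'])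
  if slug ≠ "" then slug else "station-" ++ fallback_code

-- ===== PORT B =====
-- B's comprehension: keep a-z, 0-9 and the separators " ", "-", "_"; map separators to '-'.
def pvKeep (c : Char) : Option Char :=
  if ('a' ≤ c ∧ c ≤ 'z') ∨ ('0' ≤ c ∧ c ≤ '9') ∨ (c = ' ' ∨ c = '-' ∨ c = '_') then
    some (if c = ' ' ∨ c = '-' ∨ c = '_' then '-' else c)
  else none

-- hand port of Python str.split with the single-character separator '-' (exact:
-- the pieces between consecutive occurrences of '-', empty pieces included)
def pvSplitDash : List Char → List (List Char)
  | [] => [[]]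
  | c :: k =>
    if c = '-' then [] :: pvSplitDash k
    else (c :: (pvSplitDash k).headI) :: (pvSplitDash k).tail

def slugify_station_id_alt (name_ja : String) (fallback_code : String) : String :=
  let kept := (PySem.Str.lower name_ja).toList.filterMap pvKeep
  let slug := String.mk (List.intercalate ['-'] ((pvSplitDash kept).filter (· ≠ [])))
  if slug ≠ "" then slug else "station-" ++ fallback_code

-- ===== PRECONDITION & SPEC =====
def Spec_slugify_station_id (name_ja : String) (fallback_code : String) (out : String) : Prop := out = slugify_station_id_alt name_ja fallback_code
instance (name_ja : String) (fallback_code : String) (out : String) : Decidable (Spec_slugify_station_id name_ja fallback_code out) := by unfold Spec_slugify_station_id; infer_instance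

-- ===== CLAIM (what is proved, stated in full; the proofs are below) =====
def Claim_equal_slugify_station_id : Prop := ∀ (name_ja : String) (fallback_code : String), Dom_slugify_station_id name_ja fallback_code → Spec_slugify_station_id name_ja fallback_code (slugify_station_id name_ja fallback_code)

-- ===== LEMMAS AND PROOFS =====

-- A's loop, reformulated as a function of the already-filtered character list:
-- the output of A's loop body on the kept characters (dash = separator), with the
-- previous_dash flag as the Bool argument.
def pvG : Bool → List Char → List Char
  | _, [] => []
  | pd, c :: k => if c = '-' then (if pd then pvG true k else '-' :: pvG true k) else c :: pvG false k

-- B's slug body on a kept list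
def pvW (k : List Char) : List Char :=
  List.intercalate ['-'] ((pvSplitDash k).filter (· ≠ []))

-- B's slug body as seen from inside a word (head group kept even if empty)
def pvV (k : List Char) : List Char :=
  List.intercalate ['-'] ((pvSplitDash k).headI :: (pvSplitDash k).tail.filter (· ≠ []))

theorem pvFold_eq_pvG (l : List Char) : ∀ (acc : List Char) (pd : Bool),
    ((l.foldl
      (fun (st : List Char × Bool) character =>
        if ('a' ≤ character ∧ character ≤ 'z') ∨ ('0' ≤ character ∧ character ≤ '9') then
          (st.1 ++ [character], false)
        else if character = ' ' ∨ character = '-' ∨ character = '_' then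
          ((if st.2 then st.1 else st.1 ++ ['-']), true)
        else st)
      (acc, pd)).1) = acc ++ pvG pd (l.filterMap pvKeep) := by
  induction l with
  | nil => intro acc pd; simp [pvG]
  | cons c l ih =>
    intro acc pd
    by_cases ha : ('a' ≤ c ∧ c ≤ 'z') ∨ ('0' ≤ c ∧ c ≤ '9')
    · have hs : ¬ (c = ' ' ∨ c = '-' ∨ c = '_') := by
        rintro (rfl | rfl | rfl) <;> exact absurd ha (by decide)
      have hd : c ≠ '-' := by rintro rfl; exact absurd ha (by decide)
      have hk : pvKeep c = some c := by
        unfold pvKeep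
        rw [if_pos (ha.imp_right Or.inl), if_neg hs]
      simp only [List.foldl_cons, if_pos ha]
      rw [List.filterMap_cons_some hk, ih]
      simp [pvG, hd]
    · by_cases hs : c = ' ' ∨ c = '-' ∨ c = '_'
      · have hk : pvKeep c = some '-' := by
          unfold pvKeep
          rw [if_pos (Or.inr (Or.inr hs)), if_pos hs]
        simp only [List.foldl_cons, if_neg ha, if_pos hs]
        rw [List.filterMap_cons_some hk, ih]
        cases pd <;> simp [pvG]
      · have hk : pvKeep c = none := by
          unfold pvKeep
          exact if_neg (fun h => h.elim (fun h => ha (Or.inl h))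
            (fun h => h.elim (fun h => ha (Or.inr h)) hs))
        simp only [List.foldl_cons, if_neg ha, if_neg hs]
        rw [List.filterMap_cons_none hk]
        exact ih acc pd

theorem pvDropFront (k : List Char) :
    (pvG true k).dropWhile (fun c => c == '-') = pvG true k ∧
    (pvG false k).dropWhile (fun c => c == '-') = pvG true k := by
  induction k with
  | nil => simp [pvG]
  | cons c k ih =>
    by_cases hd : c = '-'
    · subst hd
      constructor <;> simp [pvG, ih.1]
    · constructor <;>
      · simp only [pvG, if_neg hd]
        rw [List.dropWhile_cons]
        simp [hd]

theorem pvInter_singleton (a : List Char) : List.intercalate ['-'] [a] = a := by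
  simp [List.intercalate]

theorem pvInter_cons_cons (a b : List Char) (l : List (List Char)) :
    List.intercalate ['-'] (a :: b :: l) = a ++ '-' :: List.intercalate ['-'] (b :: l) := by
  simp [List.intercalate, List.intersperse]

theorem pvStripBack_cons_ne (c : Char) (l : List Char) (hc : c ≠ '-') :
    ((c :: l).reverse.dropWhile (fun c => c == '-')).reverse =
      c :: (l.reverse.dropWhile (fun c => c == '-')).reverse := by
  rw [List.reverse_cons, List.dropWhile_append]
  by_cases h : (l.reverse.dropWhile (fun c => c == '-')).isEmpty = true
  · rw [if_pos h]
    rw [List.isEmpty_iff] at h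
    simp [hc, h]
  · rw [if_neg h]
    simp

theorem pvStripBack_cons_dash (l : List Char) :
    (('-' :: l).reverse.dropWhile (fun c => c == '-')).reverse =
      if (l.reverse.dropWhile (fun c => c == '-')).reverse = [] then []
      else '-' :: (l.reverse.dropWhile (fun c => c == '-')).reverse := by
  rw [List.reverse_cons, List.dropWhile_append]
  by_cases h : (l.reverse.dropWhile (fun c => c == '-')).isEmpty = true
  · rw [if_pos h]
    rw [List.isEmpty_iff] at h
    simp [h]
  · rw [if_neg h]
    rw [List.isEmpty_iff] at h
    simp [h]

theorem pvIntercalate_eq_nil_iff (fs : List (List Char)) (h : ∀ f ∈ fs, f ≠ []) :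
    List.intercalate ['-'] fs = [] ↔ fs = [] := by
  cases fs with
  | nil => simp [List.intercalate]
  | cons f fs =>
    have hf : f ≠ [] := h f (by simp)
    cases fs with
    | nil => simp [pvInter_singleton, hf]
    | cons g gs => simp [pvInter_cons_cons, hf]

theorem pvIntercalate_cons_head (c : Char) (h : List Char) (rest : List (List Char)) :
    List.intercalate ['-'] ((c :: h) :: rest) = c :: List.intercalate ['-'] (h :: rest) := by
  cases rest with
  | nil => simp [pvInter_singleton]
  | cons g gs => simp [pvInter_cons_cons]

theorem pvG_true_dash (k : List Char) : pvG true ('-' :: k) = pvG true k := by simp [pvG]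

theorem pvG_false_dash (k : List Char) : pvG false ('-' :: k) = '-' :: pvG true k := by simp [pvG]

theorem pvG_cons_ne (pd : Bool) (c : Char) (k : List Char) (hd : c ≠ '-') :
    pvG pd (c :: k) = c :: pvG false k := by simp [pvG, hd]

theorem pvStrip_eq (k : List Char) :
    ((pvG true k).reverse.dropWhile (fun c => c == '-')).reverse = pvW k ∧
    ((pvG false k).reverse.dropWhile (fun c => c == '-')).reverse = pvV k := by
  induction k with
  | nil => simp [pvG, pvW, pvV, pvSplitDash, List.intercalate]
  | cons c k ih =>
    by_cases hd : c = '-'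
    · subst hd
      have hsplit : pvSplitDash ('-' :: k) = [] :: pvSplitDash k := by
        simp [pvSplitDash]
      have hWfilter : ∀ f ∈ (pvSplitDash k).filter (· ≠ []), f ≠ [] := by
        intro f hf
        exact of_decide_eq_true (List.mem_filter.mp hf).2
      have hWnil : pvW k = [] ↔ (pvSplitDash k).filter (· ≠ []) = [] :=
        pvIntercalate_eq_nil_iff _ hWfilter
      constructor
      · rw [pvG_true_dash, ih.1]
        simp [pvW, hsplit]
      · rw [pvG_false_dash, pvStripBack_cons_dash, ih.1]
        simp only [pvV, hsplit, List.headI, List.tail_cons]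
        by_cases hnil : (pvSplitDash k).filter (· ≠ []) = []
        · rw [if_pos (hWnil.mpr hnil), hnil]
          simp [pvInter_singleton]
        · rw [if_neg (fun h => hnil (hWnil.mp h))]
          obtain ⟨f, fs, hcase⟩ := List.exists_cons_of_ne_nil hnil
          unfold pvW
          rw [hcase, pvInter_cons_cons]
          simp
    · have hsplit : pvSplitDash (c :: k) =
          (c :: (pvSplitDash k).headI) :: (pvSplitDash k).tail := by
        simp [pvSplitDash, hd]
      have hV : pvV (c :: k) = c :: pvV k := by
        simp only [pvV, hsplit, List.headI, List.tail_cons]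
        exact pvIntercalate_cons_head c _ _
      have hWV : pvW (c :: k) = pvV (c :: k) := by
        simp only [pvW, pvV, hsplit]
        rw [List.filter_cons_of_pos (by simp)]
        simp
      constructor
      · rw [pvG_cons_ne true c k hd, pvStripBack_cons_ne c _ hd, ih.2, hWV, hV]
      · rw [pvG_cons_ne false c k hd, pvStripBack_cons_ne c _ hd, ih.2, hV]

theorem pvContains_dash : (fun c => List.contains ['-'] c) = (fun c : Char => c == '-') := by
  funext c
  simp only [List.contains_cons, List.contains_nil, Bool.or_false]

-- ===== VERDICT (by name: the statement is the Claim_ definition above) =====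
theorem slugify_station_id_spec : Claim_equal_slugify_station_id := by
  intro name_ja fallback_code _
  have hstrip : ∀ l : List Char, PySem.Chars.stripChars (pvG false l) ['-'] = pvW l := by
    intro l
    show (List.dropWhile (fun c => List.contains ['-'] c)
        ((List.dropWhile (fun c => List.contains ['-'] c) (pvG false l)).reverse)).reverse = pvW l
    rw [pvContains_dash, (pvDropFront l).2]
    exact (pvStrip_eq l).1
  unfold Spec_slugify_station_id slugify_station_id slugify_station_id_alt
  simp only [pvFold_eq_pvG, List.nil_append, hstrip]
  rfl
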